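-- pv_equiv track=rewrite | github.com/nyucel/blm2010 | final/160401056.py | xydegerlertoplami
-- ===== SOURCE A (Python) =====
-- def xydegerlertoplami(a, b):
--     xydeğerleri = []
--     xydeğerleri.append(sum(b))
--     for i in range(1, 7, 1):
--         k = 0
--         for j in range(a):
--             k += (j + 1) ** i * b[j]
--         xydeğerleri.append(k)
--     return xydeğerleri
-- ===== SOURCE B (Python) =====
-- def xydegerlertoplami(a, b):
--     toplam = sum(b)
--     acc = [0, 0, 0, 0, 0, 0]
--     for j in range(a):
--         p = j + 1
--         val = p
--         bj = b[j]
--         for i in range(6):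
--             acc[i] += val * bj
--             val *= p
--     return [toplam] + acc
-- ===== Notes on version B (the rewrite author's own statement) =====
-- stated objective: alternative
-- what changed: Replaces A's six separate passes over b (each recomputing (j+1)**i with ** from scratch) with one pass over j that maintains six accumulators and builds the powers incrementally (val *= p), keeping sum(b) as a separate first element; cost is similar.
-- outside the precondition, e.g. on xydegerlertoplami(3, [1, 2]): A raises IndexError, B raises IndexError
import Mathlib
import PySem

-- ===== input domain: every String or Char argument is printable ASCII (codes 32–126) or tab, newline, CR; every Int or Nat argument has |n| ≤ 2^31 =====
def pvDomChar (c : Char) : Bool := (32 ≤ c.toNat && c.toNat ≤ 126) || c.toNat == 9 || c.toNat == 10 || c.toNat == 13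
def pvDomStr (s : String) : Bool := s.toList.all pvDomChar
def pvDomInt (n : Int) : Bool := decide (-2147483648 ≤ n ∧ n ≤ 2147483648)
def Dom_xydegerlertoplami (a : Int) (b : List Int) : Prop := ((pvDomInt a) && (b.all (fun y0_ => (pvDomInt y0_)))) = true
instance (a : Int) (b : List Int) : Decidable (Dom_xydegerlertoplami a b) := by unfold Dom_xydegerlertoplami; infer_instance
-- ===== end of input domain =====

-- B is an alternative decomposition: one pass over b with six accumulators and incremental
-- powers (val *= p) instead of A's six passes each recomputing (j+1)**i; equal on Pre_.

-- ===== PORT A =====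
def xydegerlertoplami (a : Int) (b : List Int) : List Int :=
  let xy : List Int := [b.sum]
  (PySem.List.pyRange 1 7 1).foldl (fun xy i =>
    let k := (PySem.List.pyRange 0 a 1).foldl
      (fun k j => k + (j + 1) ^ i.toNat * PySem.List.pyGetD b j 0) 0
    xy ++ [k]) xy

-- ===== PORT B =====
def xydegerlertoplami_alt (a : Int) (b : List Int) : List Int :=
  let toplam := b.sum
  let acc := (PySem.List.pyRange 0 a 1).foldl (fun acc j =>
    let p := j + 1
    let bj := PySem.List.pyGetD b j 0
    ((PySem.List.pyRange 0 6 1).foldl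
      (fun (s : List Int × Int) i => (s.1.set i.toNat (s.1.getD i.toNat 0 + s.2 * bj), s.2 * p))
      (acc, p)).1)
    ([0, 0, 0, 0, 0, 0] : List Int)
  toplam :: acc

-- ===== PRECONDITION & SPEC =====
-- Pre_ excludes exactly the inputs where Python A raises IndexError: a > len(b).
def Pre_xydegerlertoplami (a : Int) (b : List Int) : Prop := a ≤ b.length
instance (a : Int) (b : List Int) : Decidable (Pre_xydegerlertoplami a b) := by unfold Pre_xydegerlertoplami; infer_instance
def pvWitness_xydegerlertoplami : Int × List Int := (3, [1, 2, 3])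
def Spec_xydegerlertoplami (a : Int) (b : List Int) (out : List Int) : Prop := out = xydegerlertoplami_alt a b
instance (a : Int) (b : List Int) (out : List Int) : Decidable (Spec_xydegerlertoplami a b out) := by unfold Spec_xydegerlertoplami; infer_instance

-- ===== CLAIM (what is proved, stated in full; the proofs are below) =====
def Claim_equal_xydegerlertoplami : Prop := ∀ (a : Int) (b : List Int), Dom_xydegerlertoplami a b → Pre_xydegerlertoplami a b → Spec_xydegerlertoplami a b (xydegerlertoplami a b)

-- ===== LEMMAS AND PROOFS =====

-- A's inner sum with arbitrary starting accumulator.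
def pvTA (b : List Int) (i : Nat) (k : Int) (l : List Int) : Int :=
  l.foldl (fun k j => k + (j + 1) ^ i * PySem.List.pyGetD b j 0) k

-- one step of B's inner loop (range(6)) on explicit accumulators
lemma pv_inner (bj p a1 a2 a3 a4 a5 a6 : Int) :
    ((PySem.List.pyRange 0 6 1).foldl
      (fun (s : List Int × Int) i => (s.1.set i.toNat (s.1.getD i.toNat 0 + s.2 * bj), s.2 * p))
      (([a1, a2, a3, a4, a5, a6] : List Int), p)).1
    = [a1 + p ^ 1 * bj, a2 + p ^ 2 * bj, a3 + p ^ 3 * bj,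
       a4 + p ^ 4 * bj, a5 + p ^ 5 * bj, a6 + p ^ 6 * bj] := by
  have h : PySem.List.pyRange 0 6 1 = [0, 1, 2, 3, 4, 5] := by decide
  rw [h]
  simp only [List.foldl, List.getD,
    show Int.toNat 0 = 0 from rfl, show Int.toNat 1 = 1 from rfl,
    show Int.toNat 2 = 2 from rfl, show Int.toNat 3 = 3 from rfl,
    show Int.toNat 4 = 4 from rfl, show Int.toNat 5 = 5 from rfl]
  simp [List.set]
  ring_nf
  simp

-- invariant of B's outer loop: the six accumulators hold A's six partial sums
lemma pv_bfold (b : List Int) (l : List Int) (a1 a2 a3 a4 a5 a6 : Int) :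
    l.foldl (fun acc j =>
      ((PySem.List.pyRange 0 6 1).foldl
        (fun (s : List Int × Int) i =>
          (s.1.set i.toNat (s.1.getD i.toNat 0 + s.2 * PySem.List.pyGetD b j 0), s.2 * (j + 1)))
        (acc, j + 1)).1)
      ([a1, a2, a3, a4, a5, a6] : List Int)
    = [pvTA b 1 a1 l, pvTA b 2 a2 l, pvTA b 3 a3 l,
       pvTA b 4 a4 l, pvTA b 5 a5 l, pvTA b 6 a6 l] := by
  induction l generalizing a1 a2 a3 a4 a5 a6 with
  | nil => simp [pvTA]
  | cons j l ih =>
    simp only [List.foldl_cons, pv_inner]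
    rw [ih]
    simp [pvTA, List.foldl_cons]

theorem xydegerlertoplami_eq_alt (a : Int) (b : List Int) :
    xydegerlertoplami a b = xydegerlertoplami_alt a b := by
  have h7 : PySem.List.pyRange 1 7 1 = [1, 2, 3, 4, 5, 6] := by decide
  unfold xydegerlertoplami xydegerlertoplami_alt
  rw [h7, pv_bfold]
  simp [List.foldl, pvTA]

-- ===== VERDICT (by name: the statement is the Claim_ definition above) =====
theorem xydegerlertoplami_spec : Claim_equal_xydegerlertoplami := by
  intro a b _ _
  exact xydegerlertoplami_eq_alt a b
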